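-- pv_equiv track=rewrite | github.com/ourresearch/journalsdb | views.py | process_attrs
-- ===== SOURCE A (Python) =====
-- def process_attrs(attrs):
--     valid_journal_attrs = {"issn_l", "journal_synonyms", "title", "uuid"}
--     valid_publisher_attrs = {"publisher_name", "publisher_synonyms"}
--     valid_metadata_attrs = {"issns"}
--
--     journal_attrs = attrs.intersection(valid_journal_attrs)
--     publisher_attrs = attrs.intersection(valid_publisher_attrs)
--     publisher_attrs = [a.replace("publisher_name", "name") for a in publisher_attrs]
--     metadata_attrs = attrs.intersection(valid_metadata_attrs)
--     return journal_attrs, publisher_attrs, metadata_attrs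
-- ===== SOURCE B (Python) =====
-- _CATEGORY = {
--     "issn_l": "journal", "journal_synonyms": "journal", "title": "journal", "uuid": "journal",
--     "publisher_name": "publisher", "publisher_synonyms": "publisher",
--     "issns": "metadata",
-- }
--
-- _PUBLISHER_RENAME = [("publisher_name", "name"), ("publisher_synonyms", "publisher_synonyms")]
--
--
-- def process_attrs(attrs):
--     journal_attrs, metadata_attrs = set(), set()
--     for a in attrs:
--         kind = _CATEGORY.get(a)
--         if kind == "journal":
--             journal_attrs.add(a)
--         elif kind == "metadata":
--             metadata_attrs.add(a)
--     publisher_attrs = [new for old, new in _PUBLISHER_RENAME if old in attrs]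
--     return journal_attrs, publisher_attrs, metadata_attrs
-- ===== Notes on version B (the rewrite author's own statement) =====
-- stated objective: alternative
-- what changed: A intersects attrs three times with per-category constant sets and renames by substring replace over the intersection; B makes one table-driven pass over attrs classifying each element via a category dict and builds the publisher list from a fixed-order rename table by membership, so its order never depends on set iteration order.
import Mathlib
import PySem

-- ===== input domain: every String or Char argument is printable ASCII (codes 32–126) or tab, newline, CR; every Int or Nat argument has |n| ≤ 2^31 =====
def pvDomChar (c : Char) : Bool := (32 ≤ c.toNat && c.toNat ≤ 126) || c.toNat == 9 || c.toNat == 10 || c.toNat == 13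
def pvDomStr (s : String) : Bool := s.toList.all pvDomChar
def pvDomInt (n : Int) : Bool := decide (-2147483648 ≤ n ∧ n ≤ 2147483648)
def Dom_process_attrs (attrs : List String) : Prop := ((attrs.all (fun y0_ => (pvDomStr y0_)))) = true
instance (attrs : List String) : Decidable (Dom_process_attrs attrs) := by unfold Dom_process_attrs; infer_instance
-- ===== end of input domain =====

-- B replaces A's three set-intersection passes by one table-driven pass over attrs (journal/metadata
-- buckets) plus a fixed-order rename table for the publisher bucket (objective: alternative decomposition).

-- ===== PORT A =====
def process_attrs (attrs : List String) : List String × List String × List String :=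
  let valid_journal_attrs : PySem.Set String := PySem.Set.ofList ["issn_l", "journal_synonyms", "title", "uuid"]
  let valid_publisher_attrs : PySem.Set String := PySem.Set.ofList ["publisher_name", "publisher_synonyms"]
  let valid_metadata_attrs : PySem.Set String := PySem.Set.ofList ["issns"]
  let journal_attrs := PySem.Set.inter (PySem.Set.ofList attrs) valid_journal_attrs
  let publisher_attrs := PySem.Set.inter (PySem.Set.ofList attrs) valid_publisher_attrs
  let publisher_attrs' := publisher_attrs.map (fun a => PySem.Str.replace a "publisher_name" "name")
  let metadata_attrs := PySem.Set.inter (PySem.Set.ofList attrs) valid_metadata_attrs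
  (journal_attrs, publisher_attrs', metadata_attrs)

-- ===== PORT B =====
-- Source B's module-level category table _CATEGORY
def pvCategory : PySem.Dict String String :=
  ⟨[("issn_l", "journal"), ("journal_synonyms", "journal"), ("title", "journal"), ("uuid", "journal"),
    ("publisher_name", "publisher"), ("publisher_synonyms", "publisher"), ("issns", "metadata")]⟩

-- Source B's module-level rename table _PUBLISHER_RENAME
def pvPublisherRename : List (String × String) :=
  [("publisher_name", "name"), ("publisher_synonyms", "publisher_synonyms")]

def process_attrs_alt (attrs : List String) : List String × List String × List String :=
  let jm := attrs.foldl
    (fun (st : PySem.Set String × PySem.Set String) a =>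
      match PySem.Dict.get? pvCategory a with
      | some kind =>
          if kind = "journal" then (PySem.Set.add st.1 a, st.2)
          else if kind = "metadata" then (st.1, PySem.Set.add st.2 a)
          else st
      | none => st)
    (PySem.Set.empty, PySem.Set.empty)
  let publisher_attrs := (pvPublisherRename.filter (fun x => attrs.contains x.1)).map (fun x => x.2)
  (jm.1, publisher_attrs, jm.2)

-- ===== PRECONDITION & SPEC =====
-- Pre_ excludes inputs containing BOTH publisher attrs: there A's publisher list order is CPython's
-- hash-dependent set-iteration order (it varies between runs), an accident no value can be specified for.
def Pre_process_attrs (attrs : List String) : Prop :=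
  ¬ ("publisher_name" ∈ attrs ∧ "publisher_synonyms" ∈ attrs)
instance (attrs : List String) : Decidable (Pre_process_attrs attrs) := by unfold Pre_process_attrs; infer_instance
def pvWitness_process_attrs : List String := ["title", "issns", "publisher_name", "x"]

def Spec_process_attrs (attrs : List String) (out : List String × List String × List String) : Prop := out = process_attrs_alt attrs
instance (attrs : List String) (out : List String × List String × List String) : Decidable (Spec_process_attrs attrs out) := by unfold Spec_process_attrs; infer_instance

-- ===== CLAIM (what is proved, stated in full; the proofs are below) =====
def Claim_equal_process_attrs : Prop := ∀ (attrs : List String), Dom_process_attrs attrs → Pre_process_attrs attrs → Spec_process_attrs attrs (process_attrs attrs)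

-- ===== LEMMAS AND PROOFS =====

-- B's fold step, pointwise: category lookup resolved into the two membership tests
theorem pv_step_pointwise (st : PySem.Set String × PySem.Set String) (a : String) :
    (match PySem.Dict.get? pvCategory a with
      | some kind =>
          if kind = "journal" then (PySem.Set.add st.1 a, st.2)
          else if kind = "metadata" then (st.1, PySem.Set.add st.2 a)
          else st
      | none => st)
    = (if (PySem.Set.ofList ["issn_l", "journal_synonyms", "title", "uuid"] : PySem.Set String).contains a
         then PySem.Set.add st.1 a else st.1,
       if (PySem.Set.ofList ["issns"] : PySem.Set String).contains a
         then PySem.Set.add st.2 a else st.2) := by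
  by_cases h1 : ("issn_l" : String) = a
  · subst h1; rfl
  by_cases h2 : ("journal_synonyms" : String) = a
  · subst h2; rfl
  by_cases h3 : ("title" : String) = a
  · subst h3; rfl
  by_cases h4 : ("uuid" : String) = a
  · subst h4; rfl
  by_cases h5 : ("publisher_name" : String) = a
  · subst h5; rfl
  by_cases h6 : ("publisher_synonyms" : String) = a
  · subst h6; rfl
  by_cases h7 : ("issns" : String) = a
  · subst h7; rfl
  have e1 : ("issn_l" == a) = false := beq_eq_false_iff_ne.mpr h1
  have e2 : ("journal_synonyms" == a) = false := beq_eq_false_iff_ne.mpr h2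
  have e3 : ("title" == a) = false := beq_eq_false_iff_ne.mpr h3
  have e4 : ("uuid" == a) = false := beq_eq_false_iff_ne.mpr h4
  have e5 : ("publisher_name" == a) = false := beq_eq_false_iff_ne.mpr h5
  have e6 : ("publisher_synonyms" == a) = false := beq_eq_false_iff_ne.mpr h6
  have e7 : ("issns" == a) = false := beq_eq_false_iff_ne.mpr h7
  simp [pvCategory, PySem.Dict.get?, List.find?, PySem.Set.contains, PySem.Set.ofList,
        PySem.Set.add, PySem.Set.empty, e1, e2, e3, e4, e5, e6, e7,
        Ne.symm h1, Ne.symm h2, Ne.symm h3, Ne.symm h4, Ne.symm h7]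

theorem pv_fold_pair (l : List String) (j m : PySem.Set String) :
    l.foldl
      (fun (st : PySem.Set String × PySem.Set String) a =>
        match PySem.Dict.get? pvCategory a with
        | some kind =>
            if kind = "journal" then (PySem.Set.add st.1 a, st.2)
            else if kind = "metadata" then (st.1, PySem.Set.add st.2 a)
            else st
        | none => st)
      (j, m)
    = (l.foldl (fun s a => if (PySem.Set.ofList ["issn_l", "journal_synonyms", "title", "uuid"] : PySem.Set String).contains a
                  then PySem.Set.add s a else s) j,
       l.foldl (fun s a => if (PySem.Set.ofList ["issns"] : PySem.Set String).contains a
                  then PySem.Set.add s a else s) m) := by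
  induction l generalizing j m with
  | nil => rfl
  | cons a l ih =>
      simp only [List.foldl_cons, pv_step_pointwise (j, m) a]
      rw [ih]

theorem pv_inter_add (s : PySem.Set String) (a : String) (t : PySem.Set String) :
    PySem.Set.inter (PySem.Set.add s a) t
      = if t.contains a then PySem.Set.add (PySem.Set.inter s t) a else PySem.Set.inter s t := by
  by_cases hs : a ∈ s <;> by_cases ht : a ∈ t
  · have haf : a ∈ PySem.Set.inter s t := by
      simp [PySem.Set.inter, List.mem_filter, PySem.Set.contains, hs, ht]
    simp [PySem.Set.inter, PySem.Set.add, PySem.Set.contains, hs, ht]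
  · simp [PySem.Set.inter, PySem.Set.add, PySem.Set.contains, hs, ht]
  · have haf : a ∉ PySem.Set.inter s t := by
      intro h; exact hs (List.mem_of_mem_filter h)
    simp [PySem.Set.inter, PySem.Set.add, PySem.Set.contains] at haf ⊢
    simp [hs, ht]
  · simp [PySem.Set.inter, PySem.Set.add, PySem.Set.contains, hs, ht, List.filter_append]

theorem pv_inter_foldl (t : PySem.Set String) (l : List String) (s : PySem.Set String) :
    PySem.Set.inter (l.foldl PySem.Set.add s) t
      = l.foldl (fun s a => if t.contains a then PySem.Set.add s a else s) (PySem.Set.inter s t) := by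
  induction l generalizing s with
  | nil => rfl
  | cons a l ih =>
      simp only [List.foldl_cons, ih, pv_inter_add]

theorem pv_singleton_of_mem {l : List String} {v : String} (hnd : l.Nodup)
    (h : ∀ x, x ∈ l ↔ x = v) : l = [v] := by
  cases l with
  | nil => exact absurd ((h v).mpr rfl) (by simp)
  | cons a l' =>
      have ha : a = v := (h a).mp (by simp)
      have : l' = [] := by
        cases l' with
        | nil => rfl
        | cons b l'' =>
            have hb : b = v := (h b).mp (by simp)
            simp [ha, hb] at hnd
      simp [ha, this]

-- ===== VERDICT (by name: the statement is the Claim_ definition above) =====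
theorem process_attrs_spec : Claim_equal_process_attrs := by
  intro attrs _ hpre
  unfold Spec_process_attrs process_attrs process_attrs_alt
  simp only
  rw [pv_fold_pair]
  have hof : ∀ (t : PySem.Set String), PySem.Set.inter (PySem.Set.ofList attrs) t
      = attrs.foldl (fun s a => if t.contains a then PySem.Set.add s a else s) PySem.Set.empty := by
    intro t
    rw [PySem.Set.ofList, pv_inter_foldl]
    rfl
  have hpub : (PySem.Set.inter (PySem.Set.ofList attrs)
        (PySem.Set.ofList ["publisher_name", "publisher_synonyms"])).map
          (fun a => PySem.Str.replace a "publisher_name" "name")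
      = (pvPublisherRename.filter (fun x => attrs.contains x.1)).map (fun x => x.2) := by
    by_cases hpn : "publisher_name" ∈ attrs <;> by_cases hps : "publisher_synonyms" ∈ attrs
    · exact absurd ⟨hpn, hps⟩ hpre
    · -- only publisher_name ∈ attrs
      have h1 : PySem.Set.inter (PySem.Set.ofList attrs)
          (PySem.Set.ofList ["publisher_name", "publisher_synonyms"]) = ["publisher_name"] := by
        apply pv_singleton_of_mem ((PySem.Set.nodup_ofList attrs).filter _)
        intro x
        simp only [List.mem_filter, PySem.Set.mem_ofList, PySem.Set.contains]
        constructor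
        · rintro ⟨hx, hx2⟩
          rcases (by simpa using hx2 : x = "publisher_name" ∨ x = "publisher_synonyms") with hx3 | hx3
          · exact hx3
          · exact absurd (hx3 ▸ hx) hps
        · rintro rfl; exact ⟨hpn, by simp⟩
      rw [h1]
      simp [pvPublisherRename, hpn, hps]
      decide
    · -- only publisher_synonyms ∈ attrs
      have h1 : PySem.Set.inter (PySem.Set.ofList attrs)
          (PySem.Set.ofList ["publisher_name", "publisher_synonyms"]) = ["publisher_synonyms"] := by
        apply pv_singleton_of_mem ((PySem.Set.nodup_ofList attrs).filter _)
        intro x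
        simp only [List.mem_filter, PySem.Set.mem_ofList, PySem.Set.contains]
        constructor
        · rintro ⟨hx, hx2⟩
          rcases (by simpa using hx2 : x = "publisher_name" ∨ x = "publisher_synonyms") with hx3 | hx3
          · exact absurd (hx3 ▸ hx) hpn
          · exact hx3
        · rintro rfl; exact ⟨hps, by simp⟩
      rw [h1]
      simp [pvPublisherRename, hpn, hps]
      decide
    · -- neither
      have h1 : PySem.Set.inter (PySem.Set.ofList attrs)
          (PySem.Set.ofList ["publisher_name", "publisher_synonyms"]) = [] := by
        rw [List.eq_nil_iff_forall_not_mem]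
        intro x hx
        rcases List.mem_filter.mp hx with ⟨hx1, hx2⟩
        have hxa : x ∈ attrs := (PySem.Set.mem_ofList attrs x).mp hx1
        rcases (by simpa using hx2 : x = "publisher_name" ∨ x = "publisher_synonyms") with rfl | rfl
        · exact hpn hxa
        · exact hps hxa
      rw [h1]
      simp [pvPublisherRename, hpn, hps]
  rw [hpub, hof, hof]
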